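-- pv_equiv track=rewrite | github.com/DrHazers/corporate-attribution-system | tests/manual/test_control_chain_visualization.py | _is_mixed_control_sequence
-- ===== SOURCE A (Python) =====
-- EQUITY_LIKE_CONTROL_TYPES = {
--     "equity",
--     "indirect",
--     "significant_equity",
--     "direct_equity",
--     "direct_equity_control",
-- }
--
-- def is_equity_like(control_type: str | None) -> bool:
--     normalized_control_type = (control_type or "").strip().lower()
--     return (
--         normalized_control_type in EQUITY_LIKE_CONTROL_TYPES
--         or normalized_control_type.endswith("_equity")
--     )
--
-- def _is_mixed_control_sequence(control_types: list[str]) -> bool: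
--     has_equity_like = any(is_equity_like(control_type) for control_type in control_types)
--     has_non_equity = any(
--         control_type not in {"unknown", ""}
--         and not is_equity_like(control_type)
--         for control_type in control_types
--     )
--     return has_equity_like and has_non_equity
-- ===== SOURCE B (Python) =====
-- EQUITY_LIKE_CONTROL_TYPES = {
--     "equity",
--     "indirect",
--     "significant_equity",
--     "direct_equity",
--     "direct_equity_control",
-- }
--
-- def is_equity_like(control_type):
--     normalized_control_type = (control_type or "").strip().lower()
--     return (
--         normalized_control_type in EQUITY_LIKE_CONTROL_TYPES
--         or normalized_control_type.endswith("_equity")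
--     )
--
-- def _classify(control_type):
--     if is_equity_like(control_type):
--         return "equity_like"
--     if control_type in ("unknown", ""):
--         return "neutral"
--     return "non_equity"
--
-- def _is_mixed_control_sequence(control_types):
--     kinds = {_classify(control_type) for control_type in control_types}
--     return "equity_like" in kinds and "non_equity" in kinds
-- ===== Notes on version B (the rewrite author's own statement) =====
-- stated objective: alternative
-- what changed: Instead of two any() scans with inline boolean conditions, B maps every element to a category label ('equity_like'/'neutral'/'non_equity') via a classifier, collects the categories into a set, and decides mixedness by two set-membership tests.
import Mathlib
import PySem

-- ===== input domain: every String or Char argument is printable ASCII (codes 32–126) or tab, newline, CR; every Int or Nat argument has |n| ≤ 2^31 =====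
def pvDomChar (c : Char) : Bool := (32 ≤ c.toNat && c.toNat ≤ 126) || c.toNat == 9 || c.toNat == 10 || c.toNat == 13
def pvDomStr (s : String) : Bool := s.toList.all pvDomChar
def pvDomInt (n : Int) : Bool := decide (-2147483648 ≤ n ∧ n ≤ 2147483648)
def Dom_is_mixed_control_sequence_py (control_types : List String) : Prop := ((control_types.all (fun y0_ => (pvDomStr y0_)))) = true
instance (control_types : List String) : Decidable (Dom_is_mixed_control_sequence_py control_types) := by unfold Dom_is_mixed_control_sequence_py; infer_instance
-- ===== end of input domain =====

-- B classifies each element into a category label, builds the set of categories, and answers by two set-membership tests (vs A's two inline any() passes); same O(n) cost, different decomposition.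

-- ===== PORT A =====
-- is_equity_like: '(control_type or "")' is the identity on a non-empty str and "" stays "", so on String inputs it is control_type itself.
def pvIsEquityLike (control_type : String) : Bool :=
  let normalized := PySem.Str.lower (PySem.Str.strip control_type)
  (normalized == "equity" || normalized == "indirect" || normalized == "significant_equity" ||
   normalized == "direct_equity" || normalized == "direct_equity_control") ||
  PySem.Str.endswith normalized "_equity"

def is_mixed_control_sequence_py (control_types : List String) : Bool :=
  let has_equity_like := control_types.any (fun control_type => pvIsEquityLike control_type)
  let has_non_equity := control_types.any (fun control_type =>
    !(control_type == "unknown" || control_type == "") && !pvIsEquityLike control_type)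
  has_equity_like && has_non_equity

-- ===== PORT B =====
def pvClassify (control_type : String) : String :=
  if pvIsEquityLike control_type then "equity_like"
  else if control_type == "unknown" || control_type == "" then "neutral"
  else "non_equity"

def is_mixed_control_sequence_py_alt (control_types : List String) : Bool :=
  let kinds : PySem.Set String := PySem.Set.ofList (control_types.map pvClassify)
  PySem.Set.contains kinds "equity_like" && PySem.Set.contains kinds "non_equity"

-- ===== PRECONDITION & SPEC =====
def Spec_is_mixed_control_sequence_py (control_types : List String) (out : Bool) : Prop := out = is_mixed_control_sequence_py_alt control_types
instance (control_types : List String) (out : Bool) : Decidable (Spec_is_mixed_control_sequence_py control_types out) := by unfold Spec_is_mixed_control_sequence_py; infer_instance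

-- ===== CLAIM (what is proved, stated in full; the proofs are below) =====
def Claim_equal_is_mixed_control_sequence_py : Prop := ∀ (control_types : List String), Dom_is_mixed_control_sequence_py control_types → Spec_is_mixed_control_sequence_py control_types (is_mixed_control_sequence_py control_types)

-- ===== LEMMAS AND PROOFS =====
theorem pvClassify_eq_equity (ct : String) :
    (pvClassify ct == "equity_like") = pvIsEquityLike ct := by
  unfold pvClassify
  split_ifs with h1 h2
  · rw [h1]; rfl
  · rw [Bool.not_eq_true] at h1; rw [h1]; rfl
  · rw [Bool.not_eq_true] at h1; rw [h1]; rfl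

theorem pvClassify_eq_non_equity (ct : String) :
    (pvClassify ct == "non_equity") =
      (!(ct == "unknown" || ct == "") && !pvIsEquityLike ct) := by
  unfold pvClassify
  split_ifs with h1 h2
  · rw [h1]; simp only [Bool.not_true, Bool.and_false]; rfl
  · rw [Bool.not_eq_true] at h1; rw [h1, h2]
    simp only [Bool.not_true, Bool.false_and]; rfl
  · rw [Bool.not_eq_true] at h1
    rw [Bool.not_eq_true] at h2
    rw [h1, h2]; rfl

theorem contains_ofList_map (l : List String) (k : String) :
    PySem.Set.contains (PySem.Set.ofList (l.map pvClassify)) k =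
      l.any (fun ct => pvClassify ct == k) := by
  rw [Bool.eq_iff_iff]
  simp only [PySem.Set.contains_iff, PySem.Set.mem_ofList, List.mem_map, List.any_eq_true,
    beq_iff_eq]

theorem pvAndCongr (a b c d : Bool) (h1 : a = b) (h2 : c = d) : (a && c) = (b && d) := by
  rw [h1, h2]

-- B's port rewritten to the zeta-reduced two-any form, via the classifier lemmas
theorem alt_eq (l : List String) :
    is_mixed_control_sequence_py_alt l =
      (l.any (fun ct => pvIsEquityLike ct) &&
       l.any (fun ct => !(ct == "unknown" || ct == "") && !pvIsEquityLike ct)) := by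
  show (PySem.Set.contains (PySem.Set.ofList (l.map pvClassify)) "equity_like" &&
        PySem.Set.contains (PySem.Set.ofList (l.map pvClassify)) "non_equity") = _
  rw [contains_ofList_map, contains_ofList_map]
  have e1 : l.any (fun ct => pvClassify ct == "equity_like") =
      l.any (fun ct => pvIsEquityLike ct) :=
    List.any_congr rfl (fun ct => pvClassify_eq_equity ct)
  have e2 : l.any (fun ct => pvClassify ct == "non_equity") =
      l.any (fun ct => !(ct == "unknown" || ct == "") && !pvIsEquityLike ct) :=
    List.any_congr rfl (fun ct => pvClassify_eq_non_equity ct)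
  exact pvAndCongr _ _ _ _ e1 e2

-- ===== VERDICT (by name: the statement is the Claim_ definition above) =====
theorem is_mixed_control_sequence_py_spec : Claim_equal_is_mixed_control_sequence_py := by
  intro l _
  unfold Spec_is_mixed_control_sequence_py
  rw [alt_eq]
  rfl
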